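-- pv_equiv track=rewrite | github.com/mfrancis33/fef | serpent.py | str_bitstring
-- ===== SOURCE A (Python) =====
-- def bitstring(n, l):
-- 	# Convert num to bitstring
--
-- 	if l < 1:
-- 		# Must have at least 1 character in a bitstring
-- 		raise ValueError("a bitstring must have at least 1 char")
-- 	if n < 0:
-- 		# Only works with positive ints
-- 		raise ValueError("bitstring representation undefined for neg numbers")
--
-- 	# Convert num to bitstring
-- 	result = ""
-- 	while n > 0:
-- 		result += "0" if n & 1 == 0 else "1"
-- 		n >>= 1
--
-- 	# Pad with 0s to fill rest of space if necessary
-- 	if len(result) < l: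
-- 		result = result + ("0" * (l - len(result)))
--
-- 	return result
--
-- def str_bitstring(s, l):
-- 	# Convert str to bitstring if it is a string (otherwise it is probably bytes, make sure it's a bytearray)
-- 	b = bytearray(s.encode("utf-8")) if isinstance(s, str) else bytearray(s)
--
-- 	# Convert bytearray to actual 0's and 1's
-- 	result = ""
-- 	for byte in b:
-- 		result += bitstring(byte, 8)
--
-- 	# Pad with 0s to fill rest of space if necessary
-- 	if len(result) < l:
-- 		result = result + "0" * (l - len(result))
--
-- 	return result
-- ===== SOURCE B (Python) =====
-- def str_bitstring(s, l):
--     b = bytearray(s.encode("utf-8")) if isinstance(s, str) else bytearray(s)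
--     result = "".join(format(byte, "08b")[::-1] for byte in b)
--     if len(result) < l:
--         result = result + "0" * (l - len(result))
--     return result
-- ===== Notes on version B (the rewrite author's own statement) =====
-- stated objective: faster
-- what changed: Replaces the hand-written per-bit while-loop helper (with its quadratic-tending string += and per-byte re-padding) by a closed-form format(byte,'08b')[::-1] per byte joined in one ''.join pass; only the final l-padding remains.
import Mathlib
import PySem

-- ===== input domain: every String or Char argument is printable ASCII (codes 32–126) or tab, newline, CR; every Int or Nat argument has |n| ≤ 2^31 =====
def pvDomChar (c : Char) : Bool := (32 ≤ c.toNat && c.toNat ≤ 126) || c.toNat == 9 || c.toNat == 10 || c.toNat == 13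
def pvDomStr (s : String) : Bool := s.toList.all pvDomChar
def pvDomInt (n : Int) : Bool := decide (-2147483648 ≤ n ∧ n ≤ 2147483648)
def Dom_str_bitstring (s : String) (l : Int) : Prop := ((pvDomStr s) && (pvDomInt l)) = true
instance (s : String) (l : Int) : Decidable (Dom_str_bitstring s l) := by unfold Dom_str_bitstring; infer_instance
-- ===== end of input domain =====

-- B replaces A's hand-written per-bit while-loop helper by a closed-form 8-bit
-- format per byte (reversed to LSB-first), joined in one pass (idiomatic).


-- ===== PORT A =====
-- the while-loop of bitstring: result += "0"/"1" by n & 1; n >>= 1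
-- (fuel = n.toNat only makes the loop total; it never cuts an iteration, since
--  the loop runs bit-length-of-n times and bit-length n <= n.toNat)
def pvBitLoopGo (fuel : Nat) (n : Int) (acc : List Char) : List Char :=
  match fuel with
  | 0 => acc
  | f + 1 =>
    if n > 0 then
      pvBitLoopGo f (PySem.Int.floordiv n 2)
        (acc ++ [if PySem.Int.band n 1 = 0 then '0' else '1'])
    else acc

def pvBitLoopA (n : Int) (acc : List Char) : List Char := pvBitLoopGo n.toNat n acc

-- bitstring(n, l): none exactly where Python raises (l < 1 or n < 0)
def pvBitstringA (n l : Int) : Option (List Char) :=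
  if l < 1 then none
  else if n < 0 then none
  else
    let result := pvBitLoopA n []
    some (if (result.length : Int) < l then
            result ++ List.replicate (l - (result.length : Int)).toNat '0'
          else result)

-- s.encode("utf-8") byte values: exact on the ASCII Dom (every char is one byte = its code)
def str_bitstring (s : String) (l : Int) : String :=
  let b : List Int := s.toList.map (fun c => (c.toNat : Int))
  -- bitstring(byte, 8) never raises here: byte ≥ 0 and l = 8, so getD's default is unreachable
  let result := b.foldl (fun r byte => r ++ (pvBitstringA byte 8).getD []) ([] : List Char)
  let result := if (result.length : Int) < l then
                  result ++ List.replicate (l - (result.length : Int)).toNat '0'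
                else result
  String.mk result

-- ===== PORT B =====
-- format(byte, "08b"): 8 binary digits, MSB first (exact for byte < 256)
def pvFmt8 (b : Nat) : List Char :=
  (List.range 8).reverse.map (fun i => if b.testBit i then '1' else '0')

def str_bitstring_alt (s : String) (l : Int) : String :=
  let b : List Nat := s.toList.map Char.toNat   -- utf-8 bytes; exact on the ASCII Dom
  let result := (b.map (fun byte => (pvFmt8 byte).reverse)).flatten   -- "".join(… [::-1] …)
  let result := if (result.length : Int) < l then
                  result ++ List.replicate (l - (result.length : Int)).toNat '0'
                else result
  String.mk result

-- ===== PRECONDITION & SPEC =====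
def Spec_str_bitstring (s : String) (l : Int) (out : String) : Prop := out = str_bitstring_alt s l
instance (s : String) (l : Int) (out : String) : Decidable (Spec_str_bitstring s l out) := by unfold Spec_str_bitstring; infer_instance

-- ===== CLAIM (what is proved, stated in full; the proofs are below) =====
def Claim_equal_str_bitstring : Prop := ∀ (s : String) (l : Int), Dom_str_bitstring s l → Spec_str_bitstring s l (str_bitstring s l)

-- ===== LEMMAS AND PROOFS =====

-- per-byte agreement on the whole ASCII Dom (byte < 128)
theorem pv_byte_eq : ∀ n : Nat, n < 128 →
    (pvBitstringA (n : Int) 8).getD [] = (pvFmt8 n).reverse := by decide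

theorem pv_foldl_flatten (g : Int → List Char) :
    ∀ (bs : List Int) (acc : List Char),
      bs.foldl (fun r b => r ++ g b) acc = acc ++ (bs.map g).flatten := by
  intro bs
  induction bs with
  | nil => simp
  | cons b bs ih => intro acc; simp [List.foldl_cons, ih, List.append_assoc]

theorem str_bitstring_core (s : String) (l : Int) (hDom : Dom_str_bitstring s l) :
    str_bitstring s l = str_bitstring_alt s l := by
  have hall : ∀ c ∈ s.toList, pvDomChar c = true := by
    have h := hDom
    unfold Dom_str_bitstring pvDomStr at h
    rw [Bool.and_eq_true] at h
    simpa [List.all_eq_true] using h.1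
  have hmap :
      (s.toList.map (fun c => (c.toNat : Int))).map (fun byte => (pvBitstringA byte 8).getD [])
        = (s.toList.map Char.toNat).map (fun byte => (pvFmt8 byte).reverse) := by
    simp only [List.map_map]
    apply List.map_congr_left
    intro c hc
    have hlt : c.toNat < 128 := by
      have := hall c hc
      unfold pvDomChar at this
      simp only [Bool.or_eq_true, Bool.and_eq_true, decide_eq_true_eq, beq_iff_eq] at this
      omega
    simpa using pv_byte_eq c.toNat hlt
  simp only [str_bitstring, str_bitstring_alt, pv_foldl_flatten, List.nil_append, hmap]

-- ===== VERDICT (by name: the statement is the Claim_ definition above) =====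
theorem str_bitstring_spec : Claim_equal_str_bitstring := by
  intro s l hDom
  unfold Spec_str_bitstring
  exact str_bitstring_core s l hDom
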